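-- pv_equiv track=rewrite | github.com/Palamabron/WordleSolver | level1.py | correct_letters
-- ===== SOURCE A (Python) =====
-- def correct_letters(fiveLetterList, words_list):
--     result_list = []
--     isGood = 1
--     for word_list in words_list:
--         for i in range(len(fiveLetterList)):
--             if fiveLetterList[i] != '_':
--                 if word_list[i] != fiveLetterList[i]:
--                     isGood = 0
--         if isGood:
--             result_list.append(word_list)
--         else:
--             isGood = 1
--
--     return result_list
-- ===== SOURCE B (Python) =====
-- def correct_letters(fiveLetterList, words_list):
--     # Transposed traversal: iterate over the pattern's fixed positions and
--     # successively narrow the candidate list, instead of testing each word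
--     # against the whole pattern.
--     candidates = list(words_list)
--     for i, c in enumerate(fiveLetterList):
--         if c != '_':
--             candidates = [w for w in candidates if w[i] == c]
--     return candidates
-- ===== Notes on version B (the rewrite author's own statement) =====
-- stated objective: alternative
-- what changed: Transposes the loop nest: instead of A's per-word scan of the whole pattern with a mutable 0/1 flag, B iterates over the pattern's fixed positions and successively narrows the candidate word list by one filter per constraint.
import Mathlib
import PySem

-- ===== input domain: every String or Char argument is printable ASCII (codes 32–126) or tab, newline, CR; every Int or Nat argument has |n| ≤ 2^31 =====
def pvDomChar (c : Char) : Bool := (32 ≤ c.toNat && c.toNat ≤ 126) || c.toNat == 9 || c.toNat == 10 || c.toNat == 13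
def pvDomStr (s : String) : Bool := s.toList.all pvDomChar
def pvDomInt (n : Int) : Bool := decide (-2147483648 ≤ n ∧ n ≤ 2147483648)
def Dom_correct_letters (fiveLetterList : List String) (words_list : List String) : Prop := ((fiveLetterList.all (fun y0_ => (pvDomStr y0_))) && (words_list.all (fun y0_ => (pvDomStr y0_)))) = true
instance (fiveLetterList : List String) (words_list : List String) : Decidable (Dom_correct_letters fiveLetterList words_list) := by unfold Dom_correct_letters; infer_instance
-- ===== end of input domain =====

-- B transposes the loop nest: one filter pass over the candidate list per fixed pattern position, instead of A's per-word scan of the pattern with a 0/1 flag; return values proved equal on Pre_.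

-- Python's `w[i] == c` for a string w, Int index i and string c (false on IndexError inputs, which Pre_ excludes).
def strIdxEq (w : String) (i : Int) (c : String) : Bool :=
  match PySem.Str.pyGet? w i with
  | some ch => c.toList == [ch]
  | none => false

-- ===== PORT A =====
def correct_letters (fiveLetterList : List String) (words_list : List String) : List String :=
  (words_list.foldl
    (fun (st : List String × Int) word =>
      let isGood := (PySem.List.pyRange 0 (fiveLetterList.length : Int) 1).foldl
        (fun g i =>
          if PySem.List.pyGetD fiveLetterList i "" != "_" then
            if !(strIdxEq word i (PySem.List.pyGetD fiveLetterList i "")) then 0 else g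
          else g) st.2
      if isGood ≠ 0 then (st.1 ++ [word], isGood) else (st.1, 1))
    ([], 1)).1

-- ===== PORT B =====
def correct_letters_alt (fiveLetterList : List String) (words_list : List String) : List String :=
  (PySem.List.enumerate fiveLetterList).foldl
    (fun cands p =>
      if p.2 != "_" then cands.filter (fun w => strIdxEq w p.1 p.2) else cands)
    words_list

-- ===== PRECONDITION & SPEC =====
-- Pre_ excludes exactly the inputs where Python A raises IndexError: some word shorter than a non-'_' pattern position.
def Pre_correct_letters (fiveLetterList : List String) (words_list : List String) : Prop :=
  ∀ w ∈ words_list, ∀ i < fiveLetterList.length, fiveLetterList[i]! ≠ "_" → i < w.toList.length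
instance (fiveLetterList : List String) (words_list : List String) : Decidable (Pre_correct_letters fiveLetterList words_list) := by unfold Pre_correct_letters; infer_instance

def pvWitness_correct_letters : List String × List String := (["a", "_"], ["ab", "bb"])

def Spec_correct_letters (fiveLetterList : List String) (words_list : List String) (out : List String) : Prop := out = correct_letters_alt fiveLetterList words_list
instance (fiveLetterList : List String) (words_list : List String) (out : List String) : Decidable (Spec_correct_letters fiveLetterList words_list out) := by unfold Spec_correct_letters; infer_instance

-- ===== CLAIM (what is proved, stated in full; the proofs are below) =====
def Claim_equal_correct_letters : Prop := ∀ (fiveLetterList : List String) (words_list : List String), Dom_correct_letters fiveLetterList words_list → Pre_correct_letters fiveLetterList words_list → Spec_correct_letters fiveLetterList words_list (correct_letters fiveLetterList words_list)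

-- ===== LEMMAS AND PROOFS =====

-- proof-side name for A's per-word step (definitionally the lambda in the port)
def stepF (five : List String) (st : List String × Int) (word : String) : List String × Int :=
  let isGood := (PySem.List.pyRange 0 (five.length : Int) 1).foldl
    (fun g i =>
      if PySem.List.pyGetD five i "" != "_" then
        if !(strIdxEq word i (PySem.List.pyGetD five i "")) then 0 else g
      else g) st.2
  if isGood ≠ 0 then (st.1 ++ [word], isGood) else (st.1, 1)

def goodA (five : List String) (w : String) : Bool :=
  !((PySem.List.pyRange 0 (five.length : Int) 1).any
      (fun i => PySem.List.pyGetD five i "" != "_" && !(strIdxEq w i (PySem.List.pyGetD five i ""))))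

-- a fold that only ever zeroes the flag
theorem foldl_zero_out (l : List Int) (q : Int → Bool) (g : Int) :
    l.foldl (fun g i => if q i then 0 else g) g = if l.any q then 0 else g := by
  induction l generalizing g with
  | nil => simp
  | cons x t ih => by_cases h : q x <;> simp [List.foldl, h, ih]

theorem innerA (five : List String) (w : String) (g : Int) :
    (PySem.List.pyRange 0 (five.length : Int) 1).foldl
        (fun g i =>
          if PySem.List.pyGetD five i "" != "_" then
            if !(strIdxEq w i (PySem.List.pyGetD five i "")) then 0 else g
          else g) g
      = if (PySem.List.pyRange 0 (five.length : Int) 1).any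
            (fun i => PySem.List.pyGetD five i "" != "_" && !(strIdxEq w i (PySem.List.pyGetD five i ""))) then 0 else g := by
  rw [← foldl_zero_out]
  apply PySem.List.foldl_congr_mem
  intro acc i _
  by_cases h1 : PySem.List.pyGetD five i "" != "_" <;>
    by_cases h2 : strIdxEq w i (PySem.List.pyGetD five i "") <;> simp [h1, h2]

theorem stepF_one (five : List String) (res : List String) (w : String) :
    stepF five (res, 1) w = if goodA five w then (res ++ [w], 1) else (res, 1) := by
  unfold stepF goodA
  rw [innerA]
  by_cases h : (PySem.List.pyRange 0 (five.length : Int) 1).any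
      (fun i => PySem.List.pyGetD five i "" != "_" && !(strIdxEq w i (PySem.List.pyGetD five i ""))) <;>
    simp [h]

theorem outerA (five : List String) (words : List String) (res : List String) :
    (words.foldl (stepF five) (res, 1)).1 = res ++ words.filter (goodA five) := by
  induction words generalizing res with
  | nil => simp
  | cons w t ih =>
      rw [List.foldl_cons, stepF_one, List.filter_cons]
      by_cases h : goodA five w <;> simp [h, ih]

-- B's successive narrowing collapses to one filter over the active constraints
theorem foldl_filter (l : List (Int × String)) (ws : List String) :
    l.foldl (fun cands p => if p.2 != "_" then cands.filter (fun w => strIdxEq w p.1 p.2) else cands) ws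
      = ws.filter (fun w => (l.filter (fun p => p.2 != "_")).all (fun p => strIdxEq w p.1 p.2)) := by
  induction l generalizing ws with
  | nil => simp
  | cons p t ih =>
      rw [List.foldl_cons, List.filter_cons]
      by_cases h : p.2 != "_"
      · simp only [h, if_pos]
        rw [ih, List.filter_filter]
        apply List.filter_congr
        intro w _
        simp [Bool.and_comm]
      · rw [if_neg h, if_neg h, ih]

theorem pyGetD_cast (five : List String) (k : Nat) (hk : k < five.length) :
    PySem.List.pyGetD five (k : Int) "" = five[k] := by
  simp [List.getD_eq_getElem?_getD, hk]

theorem good_eq (five : List String) (w : String) :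
    goodA five w
      = ((PySem.List.enumerate five).filter (fun p => p.2 != "_")).all (fun p => strIdxEq w p.1 p.2) := by
  rw [Bool.eq_iff_iff]
  simp only [goodA, List.all_filter, Bool.not_eq_true', List.any_eq_false,
    List.all_eq_true, PySem.List.mem_pyRange_one, PySem.List.mem_enumerate_iff, zero_add]
  constructor
  · rintro h p ⟨k, hk, rfl⟩
    have hg : PySem.List.pyGetD five (k : Int) "" = five[k] := pyGetD_cast five k hk
    have := h (k : Int) ⟨by positivity, by exact_mod_cast hk⟩
    rw [hg] at this
    by_cases hd : five[k] != "_"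
    · simp only [hd, Bool.true_and] at this
      simp only [Bool.not_eq_true'] at this
      simp [hd, this]
    · simp [hd]
  · intro h i hi
    obtain ⟨k, hk, rfl⟩ : ∃ k : Nat, k < five.length ∧ i = (k : Int) :=
      ⟨i.toNat, by omega, by omega⟩
    have hg : PySem.List.pyGetD five (k : Int) "" = five[k] := pyGetD_cast five k hk
    have := h ((k : Int), five[k]) ⟨k, hk, rfl⟩
    rw [hg]
    by_cases hd : five[k] != "_"
    · simp only [hd] at this ⊢
      simp at this
      simp [this]
    · simp [hd]

-- ===== VERDICT (by name: the statement is the Claim_ definition above) =====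
theorem correct_letters_spec : Claim_equal_correct_letters := by
  intro five words _hdom _hpre
  unfold Spec_correct_letters correct_letters_alt
  have hA : correct_letters five words = (words.foldl (stepF five) ([], 1)).1 := rfl
  rw [hA, outerA, foldl_filter]
  simp only [List.nil_append]
  exact List.filter_congr (fun w _ => good_eq five w)
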